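-- pv_equiv track=rewrite | github.com/rishabraghavendraparandeaiml-spec/RouteMaster | app.py | path_from_order
-- ===== SOURCE A (Python) =====
-- def path_from_order(adj_matrix, start_node, order):
--     curr_path = []
--     curr_steps = 0
--     curr_node = start_node
--
--     for target in order:
--         segment = adj_matrix[(curr_node, target)]
--         curr_path += segment if not curr_path else segment[1:]
--         curr_steps += len(segment) - 1
--         curr_node = target
--
--     return curr_path, curr_steps
-- ===== SOURCE B (Python) =====
-- def path_from_order(adj_matrix, start_node, order):
--     # Builds the path BACK-TO-FRONT: walks the (prev, target) pairs in reverse,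
--     # prepending each full segment and dropping the head of the accumulated
--     # suffix path (never slicing the segments themselves).
--     path = []
--     steps = 0
--     for prev, target in reversed(list(zip([start_node] + order, order))):
--         seg = adj_matrix[(prev, target)]
--         path = seg + path[1:]
--         steps += len(seg) - 1
--     return path, steps
-- ===== Notes on version B (the rewrite author's own statement) =====
-- stated objective: alternative
-- what changed: B builds the path back-to-front: it iterates over the reversed list of (prev, target) pairs, prepending each FULL segment and dropping the head of the accumulated suffix path, instead of A's forward loop that slices each later segment and branches on whether the accumulated path is still empty. …
-- outside the precondition, e.g. on path_from_order({(0, 1): [], (1, 2): [5, 6]}, 0, [1, 2]): A returns ([5, 6], 0), B returns ([6], 0)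
import Mathlib
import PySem

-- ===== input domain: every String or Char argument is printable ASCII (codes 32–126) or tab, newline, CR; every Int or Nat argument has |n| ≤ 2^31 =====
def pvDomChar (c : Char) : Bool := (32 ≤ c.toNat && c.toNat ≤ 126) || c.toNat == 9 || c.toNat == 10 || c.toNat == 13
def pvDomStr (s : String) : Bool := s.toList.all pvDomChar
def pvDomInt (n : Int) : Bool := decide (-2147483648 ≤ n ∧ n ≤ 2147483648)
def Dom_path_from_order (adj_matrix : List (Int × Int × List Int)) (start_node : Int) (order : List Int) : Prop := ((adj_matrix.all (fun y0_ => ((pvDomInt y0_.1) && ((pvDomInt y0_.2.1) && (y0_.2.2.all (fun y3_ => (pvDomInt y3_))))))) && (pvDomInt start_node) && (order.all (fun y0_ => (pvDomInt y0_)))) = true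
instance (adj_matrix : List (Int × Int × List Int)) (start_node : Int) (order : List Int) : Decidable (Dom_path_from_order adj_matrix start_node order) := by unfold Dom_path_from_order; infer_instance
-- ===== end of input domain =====

-- B builds the path back-to-front over the reversed (prev, target) pair list, prepending full
-- segments and dropping the head of the accumulated suffix path, instead of A's forward loop
-- that slices each later segment; objective: alternative decomposition, same task.

-- ===== PORT A =====
-- adj_matrix[(c, t)] : Python dict indexing, via PySem.Dict keyed by the pair (c, t);
-- missing key = KeyError (none), excluded by Pre_, so getD [] is never taken inside Pre_.
-- Shared by both ports and Pre_ (it is just the dict lookup, not part of either algorithm).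
def pvAdjGet (adj_matrix : List (Int × Int × List Int)) (c t : Int) : Option (List Int) :=
  PySem.Dict.get? (PySem.Dict.mk (adj_matrix.map (fun e => ((e.1, e.2.1), e.2.2)))) (c, t)

def path_from_order (adj_matrix : List (Int × Int × List Int)) (start_node : Int) (order : List Int) : List Int × Int :=
  -- for target in order: threading (curr_path, curr_steps, curr_node)
  let r := order.foldl
    (fun (st : List Int × Int × Int) target =>
      ( st.1 ++ (if st.1 = [] then (pvAdjGet adj_matrix st.2.2 target).getD []
                 else PySem.List.slice ((pvAdjGet adj_matrix st.2.2 target).getD []) (some 1) none),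
        st.2.1 + ((((pvAdjGet adj_matrix st.2.2 target).getD []).length : Int) - 1),
        target ))
    ([], 0, start_node)
  (r.1, r.2.1)

-- ===== PORT B =====
-- for prev, target in reversed(list(zip([start_node] + order, order))): threading (path, steps)
def path_from_order_alt (adj_matrix : List (Int × Int × List Int)) (start_node : Int) (order : List Int) : List Int × Int :=
  ((start_node :: order).zip order).reverse.foldl
    (fun (st : List Int × Int) p =>
      let seg := (pvAdjGet adj_matrix p.1 p.2).getD []
      (seg ++ PySem.List.slice st.1 (some 1) none, st.2 + ((seg.length : Int) - 1)))
    ([], 0)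

-- ===== PRECONDITION & SPEC =====
-- Pre_ requires every consecutive node pair to be a key of adj_matrix (otherwise A raises
-- KeyError) and the looked-up segment to be non-empty: an empty segment is a malformed
-- adjacency entry, and there A's skip-vs-tail choice (driven by the accumulated path being
-- empty, not by the segment itself) is accidental; B drops the suffix head uniformly instead.
def Pre_path_from_order (adj_matrix : List (Int × Int × List Int)) (start_node : Int) (order : List Int) : Prop :=
  ∀ p ∈ (start_node :: order).zip order, (pvAdjGet adj_matrix p.1 p.2).getD [] ≠ []
instance (adj_matrix : List (Int × Int × List Int)) (start_node : Int) (order : List Int) : Decidable (Pre_path_from_order adj_matrix start_node order) := by unfold Pre_path_from_order; infer_instance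
def pvWitness_path_from_order : (List (Int × Int × List Int)) × Int × List Int :=
  ([(0, 1, [0, 1]), (1, 2, [1, 7, 2])], 0, [1, 2])

def Spec_path_from_order (adj_matrix : List (Int × Int × List Int)) (start_node : Int) (order : List Int) (out : List Int × Int) : Prop := out = path_from_order_alt adj_matrix start_node order
instance (adj_matrix : List (Int × Int × List Int)) (start_node : Int) (order : List Int) (out : List Int × Int) : Decidable (Spec_path_from_order adj_matrix start_node order out) := by unfold Spec_path_from_order; infer_instance

-- ===== CLAIM (what is proved, stated in full; the proofs are below) =====
def Claim_equal_path_from_order : Prop := ∀ (adj_matrix : List (Int × Int × List Int)) (start_node : Int) (order : List Int), Dom_path_from_order adj_matrix start_node order → Pre_path_from_order adj_matrix start_node order → Spec_path_from_order adj_matrix start_node order (path_from_order adj_matrix start_node order)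

-- ===== LEMMAS AND PROOFS =====

-- A's loop started from a non-empty accumulated path always appends tails: it returns the
-- accumulated path plus the flatMap of tails, and the step sum over the remaining segments.
lemma pvA_fold (adj_matrix : List (Int × Int × List Int)) (order : List Int) :
    ∀ (p : List Int) (st c : Int), p ≠ [] →
      (order.foldl
        (fun (s : List Int × Int × Int) target =>
          ( s.1 ++ (if s.1 = [] then (pvAdjGet adj_matrix s.2.2 target).getD []
                     else PySem.List.slice ((pvAdjGet adj_matrix s.2.2 target).getD []) (some 1) none),
            s.2.1 + ((((pvAdjGet adj_matrix s.2.2 target).getD []).length : Int) - 1),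
            target ))
        (p, st, c)).1
        = p ++ (((c :: order).zip order).map (fun q => (pvAdjGet adj_matrix q.1 q.2).getD [])).flatMap (fun s => PySem.List.slice s (some 1) none)
      ∧
      (order.foldl
        (fun (s : List Int × Int × Int) target =>
          ( s.1 ++ (if s.1 = [] then (pvAdjGet adj_matrix s.2.2 target).getD []
                     else PySem.List.slice ((pvAdjGet adj_matrix s.2.2 target).getD []) (some 1) none),
            s.2.1 + ((((pvAdjGet adj_matrix s.2.2 target).getD []).length : Int) - 1),
            target ))
        (p, st, c)).2.1
        = st + ((((c :: order).zip order).map (fun q => (pvAdjGet adj_matrix q.1 q.2).getD [])).map (fun s => (s.length : Int) - 1)).sum := by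
  induction order with
  | nil => intro p st c hp; simp
  | cons t rest ih =>
    intro p st c hp
    have hne : p ++ PySem.List.slice ((pvAdjGet adj_matrix c t).getD []) (some 1) none ≠ [] := by
      simp [hp]
    have h := ih (p ++ PySem.List.slice ((pvAdjGet adj_matrix c t).getD []) (some 1) none)
      (st + ((((pvAdjGet adj_matrix c t).getD []).length : Int) - 1)) t hne
    simp only [List.foldl_cons, if_neg hp]
    refine ⟨?_, ?_⟩
    · rw [h.1]; simp [List.zip_cons_cons, List.append_assoc]
    · rw [h.2]; simp [List.zip_cons_cons]; ring

-- Closed form for A on a non-empty order whose first segment is non-empty.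
lemma pvA_cons (adj : List (Int × Int × List Int)) (start t : Int) (rest : List Int)
    (hseg : (pvAdjGet adj start t).getD [] ≠ []) :
    path_from_order adj start (t :: rest)
      = ((pvAdjGet adj start t).getD [] ++
           (((t :: rest).zip rest).map (fun q => (pvAdjGet adj q.1 q.2).getD [])).flatMap
             (fun s => PySem.List.slice s (some 1) none),
         ((((pvAdjGet adj start t).getD []).length : Int) - 1) +
           ((((t :: rest).zip rest).map (fun q => (pvAdjGet adj q.1 q.2).getD [])).map
             (fun s => (s.length : Int) - 1)).sum) := by
  unfold path_from_order
  simp only [List.foldl_cons, reduceIte, List.nil_append]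
  have h := pvA_fold adj rest ((pvAdjGet adj start t).getD [])
    (0 + ((((pvAdjGet adj start t).getD []).length : Int) - 1)) t hseg
  refine Prod.ext ?_ ?_
  · simpa using h.1
  · simp only []
    rw [h.2]; ring

-- B's reverse-fold unfolds to one step on the head pair applied after B of the tail.
lemma pvB_unfold (adj_matrix : List (Int × Int × List Int)) (start t : Int) (rest : List Int) :
    path_from_order_alt adj_matrix start (t :: rest)
      = (((pvAdjGet adj_matrix start t).getD []) ++
           PySem.List.slice (path_from_order_alt adj_matrix t rest).1 (some 1) none,
         (path_from_order_alt adj_matrix t rest).2 +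
           ((((pvAdjGet adj_matrix start t).getD []).length : Int) - 1)) := by
  unfold path_from_order_alt
  simp [List.zip_cons_cons, List.foldl_append]

-- A = B on Pre_, by induction on the order with the start node generalized.
lemma pvMain (adj : List (Int × Int × List Int)) (order : List Int) :
    ∀ start : Int, Pre_path_from_order adj start order →
      path_from_order adj start order = path_from_order_alt adj start order := by
  induction order with
  | nil => intro start _; rfl
  | cons t rest ih =>
    intro start hpre
    have hseg : (pvAdjGet adj start t).getD [] ≠ [] :=
      hpre (start, t) (by simp [List.zip_cons_cons])
    have hpre' : Pre_path_from_order adj t rest := by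
      intro p hp
      exact hpre p (by simp [List.zip_cons_cons]; right; exact hp)
    rw [pvB_unfold, ← ih t hpre', pvA_cons adj start t rest hseg]
    cases rest with
    | nil =>
      simp [path_from_order, PySem.List.slice_from_one]
    | cons u rest' =>
      have hseg1 : (pvAdjGet adj t u).getD [] ≠ [] :=
        hpre' (t, u) (by simp [List.zip_cons_cons])
      rw [pvA_cons adj t u rest' hseg1]
      obtain ⟨a, s, hs⟩ := List.exists_cons_of_ne_nil hseg1
      refine Prod.ext ?_ ?_
      · simp only [List.zip_cons_cons, List.map_cons, List.flatMap_cons, hs,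
          List.cons_append, PySem.List.slice_from_one, List.tail_cons]
      · simp only [List.zip_cons_cons, List.map_cons, List.sum_cons]
        ring

-- ===== VERDICT (by name: the statement is the Claim_ definition above) =====
theorem path_from_order_spec : Claim_equal_path_from_order := by
  intro adj start order _ hpre
  exact pvMain adj order start hpre
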